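-- pv_equiv track=rewrite | github.com/linhdvu14/cp-sols | sols/Toki/troc-23/B_Jumbo_Extra_Cheese.py | solve
-- ===== SOURCE A (Python) =====
-- def solve(N):
--     cnt = 0
--     for num in range(1, min(N, 10**5)+1):
--         p, s = 1, 0
--         for d in str(num):
--             d = int(d)
--             p *= d
--             s += d
--         if p + s == num: cnt += 1
--     return cnt
-- ===== SOURCE B (Python) =====
-- def solve(N):
--     # Mathematically, digit_product(n) + digit_sum(n) == n holds exactly for
--     # n = 19, 29, ..., 99 (1-digit: 2n != n; 2-digit 10a+b: ab+a+b = 10a+b iff b == 9;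
--     # 3+ digits: product+sum < n), so just count those below the cap.
--     m = min(N, 10**5)
--     return sum(1 for v in range(19, 100, 10) if v <= m)
-- ===== Notes on version B (the rewrite author's own statement) =====
-- stated objective: faster
-- what changed: B replaces A's per-number digit-product/digit-sum scan of 1..min(N,1e5) by counting, over the precomputed 9-element list 19,29,...,99 of the only numbers equal to their digit product plus digit sum, those not exceeding the cap.
import Mathlib
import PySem

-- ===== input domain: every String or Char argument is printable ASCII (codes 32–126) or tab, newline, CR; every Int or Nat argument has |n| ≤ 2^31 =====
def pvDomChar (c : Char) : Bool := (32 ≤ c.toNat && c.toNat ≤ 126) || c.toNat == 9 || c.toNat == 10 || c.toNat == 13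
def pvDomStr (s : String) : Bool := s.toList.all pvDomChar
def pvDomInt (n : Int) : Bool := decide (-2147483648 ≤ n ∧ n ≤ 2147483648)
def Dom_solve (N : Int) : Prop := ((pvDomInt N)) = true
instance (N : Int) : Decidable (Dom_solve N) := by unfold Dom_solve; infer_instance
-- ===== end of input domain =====

-- B replaces A's scan of all numbers up to min(N,1e5) by counting, over the 9-element
-- precomputed list 19,29,…,99 of the only numbers with digit-product+digit-sum equal to
-- themselves, those below the cap (objective: faster, O(1) instead of O(min(N,1e5))).

-- ===== PORT A =====
def solve (N : Int) : Int :=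
  (PySem.List.pyRange 1 (min N 100000 + 1)).foldl
    (fun cnt num =>
      let ps : Int × Int :=
        (PySem.Int.toStr num).toList.foldl
          (fun (ps : Int × Int) d =>
            -- int(d): d is a digit character of str(num), so ofStr? is always `some` here
            let d : Int := (PySem.Int.ofStr? (String.ofList [d])).getD 0
            (ps.1 * d, ps.2 + d)) (1, 0)
      if ps.1 + ps.2 == num then cnt + 1 else cnt) 0

-- ===== PORT B =====
def solve_alt (N : Int) : Int :=
  let m := min N 100000
  -- sum(1 for v in range(19, 100, 10) if v <= m)
  ((PySem.List.pyRange 19 100 10).countP (fun v => decide (v ≤ m)) : Nat)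

-- ===== PRECONDITION & SPEC =====
def Spec_solve (N : Int) (out : Int) : Prop := out = solve_alt N
instance (N : Int) (out : Int) : Decidable (Spec_solve N out) := by unfold Spec_solve; infer_instance

-- ===== CLAIM (what is proved, stated in full; the proofs are below) =====
def Claim_equal_solve : Prop := ∀ (N : Int), Dom_solve N → Spec_solve N (solve N)

-- ===== LEMMAS AND PROOFS =====

-- the numbers that satisfy the digit condition
def validL : List Int := [19, 29, 39, 49, 59, 69, 79, 89, 99]

-- A's inner loop body, named for the proofs (definitionally the lambda in `solve`)
def stepPS (ps : Int × Int) (d : Char) : Int × Int :=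
  let d : Int := (PySem.Int.ofStr? (String.ofList [d])).getD 0
  (ps.1 * d, ps.2 + d)

def checkA (num : Int) : Bool :=
  let ps : Int × Int := (PySem.Int.toStr num).toList.foldl stepPS (1, 0)
  ps.1 + ps.2 == num

-- arithmetic (fuel-indexed) digit product/sum pair
def psA : Nat → Nat → Int × Int
  | 0, n => ((n : Int), (n : Int))
  | f+1, n => if n < 10 then ((n : Int), (n : Int))
      else let q := psA f (n / 10); (q.1 * ((n % 10 : Nat) : Int), q.2 + ((n % 10 : Nat) : Int))

theorem psA_stable : ∀ f : Nat, ∀ n ≤ f, psA (f + 1) n = psA f n := by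
  intro f
  induction f with
  | zero => intro n hn; interval_cases n; rfl
  | succ f ih =>
    intro n hn
    by_cases h10 : n < 10
    · simp [psA, h10]
    · have hq : n / 10 ≤ f := by omega
      conv_lhs => rw [psA]
      conv_rhs => rw [psA]
      simp only [if_neg h10]
      rw [ih _ hq]

theorem psA_eq_of_le : ∀ f n : Nat, n ≤ f → psA f n = psA n n := by
  intro f
  induction f with
  | zero => intro n hn; interval_cases n; rfl
  | succ f ih =>
    intro n hn
    rcases Nat.lt_or_ge n (f + 1) with h | h
    · rw [psA_stable f n (by omega), ih n (by omega)]
    · have : n = f + 1 := by omega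
      subst this; rfl

theorem psA_rec (n : Nat) (h : 10 ≤ n) :
    psA n n = ((psA (n/10) (n/10)).1 * ((n % 10 : Nat) : Int),
               (psA (n/10) (n/10)).2 + ((n % 10 : Nat) : Int)) := by
  have h1 : psA n n = psA ((n - 1) + 1) n := by congr 1; omega
  rw [h1]
  simp only [psA, if_neg (by omega : ¬ n < 10)]
  rw [psA_eq_of_le (n - 1) (n / 10) (by omega)]

theorem psA_lt10 (n : Nat) (h : n < 10) : psA n n = ((n : Int), (n : Int)) := by
  cases n with
  | zero => rfl
  | succ m => simp [psA, h]

theorem psA_nonneg : ∀ n : Nat, 0 ≤ (psA n n).1 ∧ 0 ≤ (psA n n).2 := by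
  intro n
  induction n using Nat.strong_induction_on with
  | _ n ih =>
    by_cases h10 : n < 10
    · rw [psA_lt10 n h10]; constructor <;> positivity
    · rw [psA_rec n (by omega)]
      have hq := ih (n / 10) (by omega)
      have hr : (0 : Int) ≤ ((n % 10 : Nat) : Int) := by positivity
      exact ⟨mul_nonneg hq.1 hr, add_nonneg hq.2 hr⟩

set_option maxRecDepth 10000 in
set_option maxHeartbeats 2000000 in
theorem psA_small : ∀ k < 200, 1 ≤ k →
    (((psA k k).1 + (psA k k).2 == (k:Int)) = decide ((k:Int) ∈ validL)) := by decide

set_option maxRecDepth 10000 in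
set_option maxHeartbeats 2000000 in
theorem psA_base : ∀ k < 2000, 200 ≤ k → (psA k k).1 + (psA k k).2 < (k : Int) := by decide

theorem psA_large : ∀ k : Nat, 200 ≤ k → (psA k k).1 + (psA k k).2 < (k : Int) := by
  intro k
  induction k using Nat.strong_induction_on with
  | _ k ih =>
    intro hk
    by_cases hsmall : k < 2000
    · exact psA_base k hsmall hk
    · rw [psA_rec k (by omega)]
      have hq : 200 ≤ k / 10 := by omega
      have hlt := ih (k / 10) (by omega) hq
      obtain ⟨hp, hs⟩ := psA_nonneg (k / 10)
      have hr9 : ((k % 10 : Nat) : Int) ≤ 9 := by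
        have : k % 10 ≤ 9 := by omega
        exact_mod_cast this
      have hr0 : (0 : Int) ≤ ((k % 10 : Nat) : Int) := by positivity
      have hkq : (k : Int) = 10 * ((k / 10 : Nat) : Int) + ((k % 10 : Nat) : Int) := by
        push_cast; omega
      have hq200 : (200 : Int) ≤ ((k / 10 : Nat) : Int) := by exact_mod_cast hq
      have hmul : (psA (k/10) (k/10)).1 * ((k % 10 : Nat) : Int)
          ≤ (psA (k/10) (k/10)).1 * 9 := by
        exact mul_le_mul_of_nonneg_left hr9 hp
      nlinarith

-- toDigitsCore plumbing
theorem tdc_append : ∀ (f n : Nat) (ds : List Char), n < f →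
    Nat.toDigitsCore 10 f n ds = Nat.toDigitsCore 10 f n [] ++ ds := by
  intro f
  induction f with
  | zero => intro n ds h; omega
  | succ f ih =>
    intro n ds h
    simp only [Nat.toDigitsCore]
    by_cases h0 : n / 10 = 0
    · simp [h0]
    · have hlt : n / 10 < f := by omega
      simp only [if_neg h0]
      rw [ih (n / 10) _ hlt, ih (n / 10) [(n % 10).digitChar] hlt, List.append_assoc]
      rfl

theorem tdc_fuel : ∀ (f1 : Nat), ∀ (f2 n : Nat) (ds : List Char), n < f1 → n < f2 →
    Nat.toDigitsCore 10 f1 n ds = Nat.toDigitsCore 10 f2 n ds := by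
  intro f1
  induction f1 with
  | zero => intro f2 n ds h1 h2; omega
  | succ f1 ih =>
    intro f2 n ds h1 h2
    cases f2 with
    | zero => omega
    | succ f2 =>
      simp only [Nat.toDigitsCore]
      by_cases h0 : n / 10 = 0
      · simp [h0]
      · simp only [if_neg h0]
        exact ih f2 (n / 10) _ (by omega) (by omega)

theorem toDigits_lt10 (n : Nat) (h : n < 10) : Nat.toDigits 10 n = [Nat.digitChar n] := by
  simp [Nat.toDigits, Nat.toDigitsCore, Nat.div_eq_of_lt h, Nat.mod_eq_of_lt h]

theorem toDigits_snoc (n : Nat) (h : 10 ≤ n) :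
    Nat.toDigits 10 n = Nat.toDigits 10 (n / 10) ++ [Nat.digitChar (n % 10)] := by
  show Nat.toDigitsCore 10 (n + 1) n [] = _
  have h0 : ¬ n / 10 = 0 := by omega
  simp only [Nat.toDigitsCore, if_neg h0]
  rw [tdc_append n (n / 10) _ (by omega),
      tdc_fuel n (n / 10 + 1) (n / 10) [] (by omega) (by omega)]
  rfl

theorem ofStr?_digitChar : ∀ d : Nat, d < 10 →
    (PySem.Int.ofChars? [Nat.digitChar d]).getD 0 = (d : Int) := by
  decide

theorem stepPS_digit (ps : Int × Int) (d : Nat) (h : d < 10) :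
    stepPS ps (Nat.digitChar d) = (ps.1 * (d : Int), ps.2 + (d : Int)) := by
  simp [stepPS, ofStr?_digitChar d h]

theorem bridge : ∀ k : Nat, 1 ≤ k →
    (Nat.toDigits 10 k).foldl stepPS (1, 0) = psA k k := by
  intro k
  induction k using Nat.strong_induction_on with
  | _ k ih =>
    intro hk
    by_cases h10 : k < 10
    · rw [toDigits_lt10 k h10, psA_lt10 k h10]
      simp only [List.foldl]
      rw [stepPS_digit _ _ h10]
      simp
    · rw [toDigits_snoc k (by omega), List.foldl_append,
          ih (k / 10) (by omega) (by omega), psA_rec k (by omega)]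
      simp only [List.foldl]
      rw [stepPS_digit _ _ (by omega : k % 10 < 10)]

theorem checkA_eq : ∀ n : Int, 1 ≤ n → checkA n = decide (n ∈ validL) := by
  intro n hn
  obtain ⟨k, rfl⟩ : ∃ k : Nat, n = (k : Int) := ⟨n.toNat, (Int.toNat_of_nonneg (by omega)).symm⟩
  have hk : 1 ≤ k := by exact_mod_cast hn
  have hch : checkA (k : Int) = ((psA k k).1 + (psA k k).2 == (k : Int)) := by
    unfold checkA
    rw [PySem.Int.toList_toStr]
    simp only [PySem.Int.toChars, if_neg (by omega : ¬ (k : Int) < 0), Int.toNat_natCast]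
    rw [bridge k hk]
  rw [hch]
  by_cases hsmall : k < 200
  · exact psA_small k hsmall hk
  · have hlt := psA_large k (by omega)
    have h1 : ((psA k k).1 + (psA k k).2 == (k : Int)) = false := by
      rw [beq_eq_false_iff_ne]; exact ne_of_lt hlt
    have h2 : decide ((k : Int) ∈ validL) = false := by
      have h200 : (200 : Int) ≤ (k : Int) := by exact_mod_cast (by omega : 200 ≤ k)
      rw [decide_eq_false_iff_not]
      intro hm
      simp only [validL, List.mem_cons, List.not_mem_nil, or_false] at hm
      omega
    rw [h1, h2]

theorem count_le_succ : ∀ (L : List Int), L.Nodup → ∀ s : Int,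
    L.countP (fun v => decide (v ≤ s + 1)) =
      L.countP (fun v => decide (v ≤ s)) + (if (s + 1) ∈ L then 1 else 0) := by
  intro L
  induction L with
  | nil => intro _ s; simp
  | cons a t ih =>
    intro hnd s
    have hna : a ∉ t := (List.nodup_cons.mp hnd).1
    have ih' := ih (List.nodup_cons.mp hnd).2 s
    simp only [List.countP_cons, List.mem_cons, ih']
    by_cases ha : s + 1 = a
    · have h1 : decide (a ≤ s + 1) = true := by rw [decide_eq_true_eq]; omega
      have h2 : decide (a ≤ s) = false := by rw [decide_eq_false_iff_not]; omega
      simp [h2, ha, hna]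
    · have h4 : (s + 1 = a ∨ s + 1 ∈ t) ↔ s + 1 ∈ t := or_iff_right ha
      have h1 : decide (a ≤ s + 1) = decide (a ≤ s) := by
        by_cases h : a ≤ s
        · have h' : a ≤ s + 1 := by omega
          simp [h, h']
        · have h' : ¬ a ≤ s + 1 := by omega
          simp [h, h']
      rw [h1]
      simp only [h4]
      ring

theorem count_lt19 (s : Int) (h : s < 19) :
    validL.countP (fun v => decide (v ≤ s)) = 0 := by
  rw [List.countP_eq_zero]
  intro a ha
  simp only [validL, List.mem_cons, List.not_mem_nil, or_false] at ha
  simp only [decide_eq_true_eq]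
  omega

theorem count_upto : ∀ t : Nat,
    (PySem.List.pyRange 1 ((t : Int) + 1)).countP checkA
      = validL.countP (fun v => decide (v ≤ (t : Int))) := by
  intro t
  induction t with
  | zero =>
    rw [PySem.List.pyRange_one_eq_nil (by omega)]
    simp [count_lt19 0 (by omega)]
  | succ t ih =>
    have hcast : (((t + 1 : Nat)) : Int) = (t : Int) + 1 := by push_cast; ring
    rw [hcast, PySem.List.pyRange_one_succ_right (by omega : (1 : Int) ≤ (t : Int) + 1),
        List.countP_append, ih, count_le_succ validL (by decide) (t : Int)]
    simp only [List.countP_cons, List.countP_nil, checkA_eq ((t : Int) + 1) (by omega)]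
    by_cases hm : ((t : Int) + 1) ∈ validL <;> simp [hm]

theorem solve_eq_count (N : Int) :
    solve N = ((PySem.List.pyRange 1 (min N 100000 + 1)).countP checkA : Nat) := by
  have h := PySem.List.foldl_count_if checkA (PySem.List.pyRange 1 (min N 100000 + 1)) 0
  rw [zero_add] at h
  exact h

theorem solve_alt_eq (N : Int) :
    solve_alt N = (validL.countP (fun v => decide (v ≤ min N 100000)) : Nat) := by
  have h : PySem.List.pyRange 19 100 10 = validL := by decide
  simp only [solve_alt]
  rw [h]

-- ===== VERDICT (by name: the statement is the Claim_ definition above) =====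
theorem solve_spec : Claim_equal_solve := by
  intro N _
  show solve N = solve_alt N
  rw [solve_eq_count, solve_alt_eq]
  congr 1
  by_cases h : min N 100000 ≤ 0
  · rw [PySem.List.pyRange_one_eq_nil (by omega), count_lt19 _ (by omega)]
    rfl
  · obtain ⟨t, ht⟩ : ∃ t : Nat, min N 100000 = (t : Int) :=
      ⟨(min N 100000).toNat, (Int.toNat_of_nonneg (by omega)).symm⟩
    rw [ht]
    exact count_upto t
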